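-- pv_equiv track=rewrite | github.com/gro-w-up/crewcrew-coding-test-study | 박한결/코딩테스트 고득점 kit/동적계획법/N으로 표현.py | solution
-- ===== SOURCE A (Python) =====
-- def solution(N, number):
--     answer = -1
--     DP = []
--
--     for i in range(1, 9):
--         numbers = set()
--         numbers.add( int(str(N) * i) )
--
--         for j in range(0, i-1):
--             for x in DP[j]:
--                 for y in DP[-j-1]:
--                     numbers.add(x + y)
--                     numbers.add(x - y)
--                     numbers.add(x * y)
--
--                     if y != 0:
--                         numbers.add(x // y)
--
--         if number in numbers:
--             answer = i
--             break
--
--         DP.append(numbers)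
--
--     return answer
-- ===== SOURCE B (Python) =====
-- def _ops(x, y):
--     res = (x + y, x - y, x * y)
--     return res + (x // y,) if y else res
--
--
-- def solution(N, number):
--     cache = {}
--
--     def reach(count):
--         # set of values expressible with exactly `count` copies of N
--         if count not in cache:
--             vals = {int(str(N) * count)}
--             for a in range(1, count):
--                 for x in reach(a):
--                     for y in reach(count - a):
--                         vals.update(_ops(x, y))
--             cache[count] = vals
--         return cache[count]
--
--     return next((c for c in range(1, 9) if number in reach(c)), -1)
-- ===== Notes on version B (the rewrite author's own statement) =====
-- stated objective: alternative
-- what changed: Replaces A's iterative DP-list with negative indexing and a break/answer variable by a memoized recursive helper reach(count) returning the set of values expressible with exactly count copies of N, an _ops helper for the four combinations, and a first-match generator over counts 1..8.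
import Mathlib
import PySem

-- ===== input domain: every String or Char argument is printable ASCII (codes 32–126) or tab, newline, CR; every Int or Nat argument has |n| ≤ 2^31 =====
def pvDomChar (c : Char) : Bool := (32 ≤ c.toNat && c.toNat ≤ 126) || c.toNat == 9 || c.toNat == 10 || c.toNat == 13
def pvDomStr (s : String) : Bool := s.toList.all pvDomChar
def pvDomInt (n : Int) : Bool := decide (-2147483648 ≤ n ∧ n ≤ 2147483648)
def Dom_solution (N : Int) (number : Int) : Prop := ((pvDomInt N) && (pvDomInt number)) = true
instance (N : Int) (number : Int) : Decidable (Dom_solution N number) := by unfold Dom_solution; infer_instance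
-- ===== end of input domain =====

-- B replaces A's iterative DP list (with negative indexing) by a memoized recursive
-- helper reach(count) plus a first-match generator over counts 1..8; objective: alternative decomposition.

-- shared helper: int(str(N) * i); .getD 0 is only reached where Python raises ValueError (outside Pre_)
def pyRepInt (N : Int) (i : Nat) : Int :=
  (PySem.Int.ofChars? ((List.replicate i (PySem.Int.toChars N)).flatten)).getD 0

-- ===== PORT A =====
-- the set `numbers` built at iteration i from the table DP
def aNumbers (N : Int) (DP : List (PySem.Set Int)) (i : Nat) : PySem.Set Int :=
  (List.range (i - 1)).foldl (fun nums (j : Nat) =>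
    (PySem.List.pyGetD DP (j : Int) []).foldl (fun nums x =>
      (PySem.List.pyGetD DP (-(j : Int) - 1) []).foldl (fun nums y =>
        let nums := PySem.Set.add nums (x + y)
        let nums := PySem.Set.add nums (x - y)
        let nums := PySem.Set.add nums (x * y)
        if y ≠ 0 then PySem.Set.add nums (PySem.Int.floordiv x y) else nums) nums) nums)
    (PySem.Set.add PySem.Set.empty (pyRepInt N i))

-- the `for i in range(1, 9)` loop with its break / answer variable, as fuel recursion
def aLoop (N number : Int) : Nat → Nat → List (PySem.Set Int) → Int
  | 0, _, _ => -1
  | fuel + 1, i, DP =>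
    let numbers := aNumbers N DP i
    if number ∈ numbers then (i : Int)
    else aLoop N number fuel (i + 1) (DP ++ [numbers])

def solution (N : Int) (number : Int) : Int :=
  aLoop N number 8 1 []

-- ===== PORT B =====
def opsList (x y : Int) : List Int :=
  let res := [x + y, x - y, x * y]
  if y ≠ 0 then res ++ [PySem.Int.floordiv x y] else res

-- reach count = set of values expressible with exactly `count` copies of N (memo cache elided: it is value-transparent)
def reach (N : Int) (c : Nat) : PySem.Set Int :=
  (List.range' 1 (c - 1)).attach.foldl
    (fun vals a =>
      (reach N a.1).foldl (fun vals x =>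
        (reach N (c - a.1)).foldl (fun vals y =>
          (opsList x y).foldl PySem.Set.add vals) vals) vals)
    (PySem.Set.add PySem.Set.empty (pyRepInt N c))
termination_by c
decreasing_by
  · have := a.2; rw [List.mem_range'_1] at this; omega
  · have := a.2; rw [List.mem_range'_1] at this; omega

-- next((c for c in range(1, 9) if number in reach(c)), -1)
def altFind (N number : Int) : Nat → Nat → Int
  | 0, _ => -1
  | fuel + 1, c => if number ∈ reach N c then (c : Int) else altFind N number fuel (c + 1)

def solution_alt (N : Int) (number : Int) : Int :=
  altFind N number 8 1

-- ===== PRECONDITION & SPEC =====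
-- Pre_ excludes exactly the inputs where Python A raises ValueError (int(str(N)*i) with N < 0
-- at some i ≥ 2, reached whenever N < 0 and number ≠ N); B raises identically there.
def Pre_solution (N : Int) (number : Int) : Prop := 0 ≤ N ∨ N = number
instance (N : Int) (number : Int) : Decidable (Pre_solution N number) := by
  unfold Pre_solution; infer_instance

def pvWitness_solution : Int × Int := (5, 12)

def Spec_solution (N : Int) (number : Int) (out : Int) : Prop := out = solution_alt N number
instance (N : Int) (number : Int) (out : Int) : Decidable (Spec_solution N number out) := by
  unfold Spec_solution; infer_instance

-- ===== CLAIM (what is proved, stated in full; the proofs are below) =====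
def Claim_equal_solution : Prop := ∀ (N : Int) (number : Int), Dom_solution N number → Pre_solution N number → Spec_solution N number (solution N number)

-- ===== LEMMAS AND PROOFS =====

-- the set A builds at iteration i, from the table of the sets of the previous iterations, is reach N i
-- the three adds plus the guarded floordiv add are one fold over opsList
lemma adds_eq_opsList (x y : Int) (vals : PySem.Set Int) :
    (let v := PySem.Set.add vals (x + y)
     let v := PySem.Set.add v (x - y)
     let v := PySem.Set.add v (x * y)
     if y ≠ 0 then PySem.Set.add v (PySem.Int.floordiv x y) else v)
      = (opsList x y).foldl PySem.Set.add vals := by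
  simp only [opsList]
  by_cases hy : y = 0 <;> simp [hy, List.foldl]

lemma aNumbers_eq_reach (N : Int) (i : Nat) (hi : 1 ≤ i) :
    aNumbers N ((List.range' 1 (i - 1)).map (reach N)) i = reach N i := by
  conv_rhs => rw [reach]
  rw [List.foldl_attach
    (f := fun vals a => (reach N a).foldl (fun vals x =>
      (reach N (i - a)).foldl (fun vals y =>
        (opsList x y).foldl PySem.Set.add vals) vals) vals)]
  conv_rhs => rw [List.range'_eq_map_range, List.foldl_map]
  unfold aNumbers
  apply PySem.List.foldl_congr_mem
  intro acc j hj
  have hjlt : j < i - 1 := List.mem_range.mp hj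
  have hlen : ((List.range' 1 (i - 1)).map (reach N)).length = i - 1 := by simp
  have h1 : PySem.List.pyGetD ((List.range' 1 (i - 1)).map (reach N)) (j : Int) []
      = reach N (1 + j) := by
    rw [PySem.List.pyGetD_natCast, List.getD_eq_getElem _ _ (by omega : j < _)]
    simp [List.getElem_range']
  have h2 : PySem.List.pyGetD ((List.range' 1 (i - 1)).map (reach N)) (-(j : Int) - 1) []
      = reach N (i - (1 + j)) := by
    have hc : (-(j : Int) - 1) = -(((j + 1 : Nat) : Int)) := by push_cast; ring
    rw [hc, PySem.List.pyGetD_neg_natCast _ _ _ (by omega) (by omega)]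
    simp only [hlen, List.getElem_map, List.getElem_range']
    congr 1
    omega
  rw [h1, h2]
  apply PySem.List.foldl_congr_mem
  intro acc2 x _
  apply PySem.List.foldl_congr_mem
  intro acc3 y _
  exact adds_eq_opsList x y acc3

lemma aLoop_eq_altFind (N number : Int) :
    ∀ (fuel i : Nat), 1 ≤ i →
      aLoop N number fuel i ((List.range' 1 (i - 1)).map (reach N)) = altFind N number fuel i := by
  intro fuel
  induction fuel with
  | zero => intro i _; rfl
  | succ f ih =>
    intro i hi
    rw [aLoop, altFind, aNumbers_eq_reach N i hi]
    split
    · rfl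
    · have h1 : (List.range' 1 (i - 1)).map (reach N) ++ [reach N i]
          = (List.range' 1 ((i + 1) - 1)).map (reach N) := by
        have h2 : (i + 1) - 1 = (i - 1) + 1 := by omega
        rw [h2, List.range'_concat, show 1 + 1 * (i - 1) = i by omega, List.map_append,
          List.map_singleton]
      rw [h1]
      exact ih (i + 1) (by omega)

-- ===== VERDICT (by name: the statement is the Claim_ definition above) =====
theorem solution_spec : Claim_equal_solution := by
  intro N number _ _
  unfold Spec_solution solution solution_alt
  have h := aLoop_eq_altFind N number 8 1 (by omega)
  simpa using h
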